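-- pv_equiv track=rewrite | github.com/imPerella/CS541---Meta-Learning-in-the-development-of-a-General-Game-Player | State.py | _split_edge_and_inner_cells
-- ===== SOURCE A (Python) =====
-- def _split_edge_and_inner_cells(rows, cols, forbidden_positions=None):
--     forbidden = forbidden_positions or set()
--     edge = []
--     inner = []
--
--     for r in range(rows):
--         for c in range(cols):
--             if (r, c) in forbidden:
--                 continue
--
--             if r in (0, rows - 1) or c in (0, cols - 1):
--                 edge.append((r, c))
--             else:
--                 inner.append((r, c))
--
--     return edge, inner
-- ===== SOURCE B (Python) =====
-- def _split_edge_and_inner_cells(rows, cols, forbidden_positions=None):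
--     forbidden = forbidden_positions or set()
--     edge = []
--     if rows >= 1 and cols >= 1:
--         # top row: every cell is an edge cell
--         edge.extend((0, c) for c in range(cols) if (0, c) not in forbidden)
--         last = cols - 1
--         # middle rows: only the first and (if distinct) last column are edge cells
--         for r in range(1, rows - 1):
--             if (r, 0) not in forbidden:
--                 edge.append((r, 0))
--             if last != 0 and (r, last) not in forbidden:
--                 edge.append((r, last))
--         # bottom row (only if distinct from the top row)
--         if rows >= 2:
--             edge.extend((rows - 1, c) for c in range(cols) if (rows - 1, c) not in forbidden)
--     inner = [(r, c) for r in range(1, rows - 1)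
--                     for c in range(1, cols - 1)
--                     if (r, c) not in forbidden]
--     return edge, inner
-- ===== Notes on version B (the rewrite author's own statement) =====
-- stated objective: alternative
-- what changed: Instead of scanning every cell of the grid and classifying it, B walks only the boundary (top row, side columns of middle rows, bottom row) to build edge, and iterates only over the interior rectangle range(1,rows-1) x range(1,cols-1) to build inner, in the same row-major order.
import Mathlib
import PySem

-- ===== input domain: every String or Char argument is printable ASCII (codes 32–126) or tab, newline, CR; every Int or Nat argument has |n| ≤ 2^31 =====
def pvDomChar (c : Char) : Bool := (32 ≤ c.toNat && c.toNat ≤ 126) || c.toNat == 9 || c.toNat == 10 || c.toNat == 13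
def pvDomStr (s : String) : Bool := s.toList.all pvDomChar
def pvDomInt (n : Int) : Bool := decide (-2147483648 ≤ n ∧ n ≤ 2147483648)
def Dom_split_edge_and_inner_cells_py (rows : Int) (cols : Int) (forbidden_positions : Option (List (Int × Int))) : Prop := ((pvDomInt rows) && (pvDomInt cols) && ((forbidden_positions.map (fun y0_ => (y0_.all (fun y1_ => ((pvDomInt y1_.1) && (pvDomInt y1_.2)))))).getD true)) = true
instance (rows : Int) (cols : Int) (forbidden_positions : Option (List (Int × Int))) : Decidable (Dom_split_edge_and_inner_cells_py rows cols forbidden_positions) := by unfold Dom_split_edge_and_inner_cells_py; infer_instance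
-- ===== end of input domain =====

-- B builds `edge` by walking only the boundary and `inner` by iterating only over the
-- interior rectangle, instead of classifying every cell of the full grid scan (objective: alternative).

-- ===== PORT A =====
def split_edge_and_inner_cells_py (rows : Int) (cols : Int) (forbidden_positions : Option (List (Int × Int))) : (List (Int × Int)) × (List (Int × Int)) :=
  let forbidden := forbidden_positions.getD []   -- `forbidden_positions or set()`: None/[] → empty; membership test is the same
  (PySem.List.pyRange 0 rows 1).foldl (fun acc r =>
    (PySem.List.pyRange 0 cols 1).foldl (fun acc c =>
      if forbidden.contains (r, c) then acc
      else if r = 0 ∨ r = rows - 1 ∨ c = 0 ∨ c = cols - 1 then (acc.1 ++ [(r, c)], acc.2)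
      else (acc.1, acc.2 ++ [(r, c)])) acc) ([], [])

-- ===== PORT B =====
def split_edge_and_inner_cells_py_alt (rows : Int) (cols : Int) (forbidden_positions : Option (List (Int × Int))) : (List (Int × Int)) × (List (Int × Int)) :=
  let forbidden := forbidden_positions.getD []
  let edge : List (Int × Int) :=
    if rows ≥ 1 ∧ cols ≥ 1 then
      let top := ((PySem.List.pyRange 0 cols 1).filter (fun c => !forbidden.contains (0, c))).map (fun c => ((0 : Int), c))
      let last := cols - 1
      let mid := (PySem.List.pyRange 1 (rows - 1) 1).foldl (fun acc r =>
        let acc' := if !forbidden.contains (r, 0) then acc ++ [(r, (0 : Int))] else acc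
        if last ≠ 0 ∧ !forbidden.contains (r, last) then acc' ++ [(r, last)] else acc') []
      let bot := if rows ≥ 2 then ((PySem.List.pyRange 0 cols 1).filter (fun c => !forbidden.contains (rows - 1, c))).map (fun c => (rows - 1, c)) else []
      top ++ mid ++ bot
    else []
  let inner : List (Int × Int) := (PySem.List.pyRange 1 (rows - 1) 1).flatMap (fun r =>
    ((PySem.List.pyRange 1 (cols - 1) 1).filter (fun c => !forbidden.contains (r, c))).map (fun c => (r, c)))
  (edge, inner)

-- ===== PRECONDITION & SPEC =====
def Spec_split_edge_and_inner_cells_py (rows : Int) (cols : Int) (forbidden_positions : Option (List (Int × Int))) (out : (List (Int × Int)) × (List (Int × Int))) : Prop := out = split_edge_and_inner_cells_py_alt rows cols forbidden_positions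
instance (rows : Int) (cols : Int) (forbidden_positions : Option (List (Int × Int))) (out : (List (Int × Int)) × (List (Int × Int))) : Decidable (Spec_split_edge_and_inner_cells_py rows cols forbidden_positions out) := by unfold Spec_split_edge_and_inner_cells_py; infer_instance

-- ===== CLAIM (what is proved, stated in full; the proofs are below) =====
def Claim_equal_split_edge_and_inner_cells_py : Prop := ∀ (rows : Int) (cols : Int) (forbidden_positions : Option (List (Int × Int))), Dom_split_edge_and_inner_cells_py rows cols forbidden_positions → Spec_split_edge_and_inner_cells_py rows cols forbidden_positions (split_edge_and_inner_cells_py rows cols forbidden_positions)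

-- ===== LEMMAS AND PROOFS =====

-- A's inner loop over one row, characterised as two filters of the column range.
theorem rowA (forb : List (Int × Int)) (rows cols r : Int) (cs : List Int)
    (acc : List (Int × Int) × List (Int × Int)) :
    cs.foldl (fun acc c =>
      if forb.contains (r, c) then acc
      else if r = 0 ∨ r = rows - 1 ∨ c = 0 ∨ c = cols - 1 then (acc.1 ++ [(r, c)], acc.2)
      else (acc.1, acc.2 ++ [(r, c)])) acc
    = (acc.1 ++ (cs.filter (fun c => !forb.contains (r, c) && decide (r = 0 ∨ r = rows - 1 ∨ c = 0 ∨ c = cols - 1))).map (fun c => (r, c)),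
       acc.2 ++ (cs.filter (fun c => !forb.contains (r, c) && !decide (r = 0 ∨ r = rows - 1 ∨ c = 0 ∨ c = cols - 1))).map (fun c => (r, c))) := by
  induction cs generalizing acc with
  | nil => simp
  | cons a t ih =>
    rw [List.foldl_cons]
    simp only [List.filter_cons]
    by_cases h1 : forb.contains (r, a) = true
    · have hm : (r, a) ∈ forb := by simpa using h1
      have hb : (!forb.contains (r, a) && decide (r = 0 ∨ r = rows - 1 ∨ a = 0 ∨ a = cols - 1)) = false := by simp [hm]
      have hb2 : (!forb.contains (r, a) && !decide (r = 0 ∨ r = rows - 1 ∨ a = 0 ∨ a = cols - 1)) = false := by simp [hm]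
      rw [if_pos h1, ih, hb, hb2]; simp
    · have hm : (r, a) ∉ forb := by simpa using h1
      by_cases h2 : r = 0 ∨ r = rows - 1 ∨ a = 0 ∨ a = cols - 1
      · have hb : (!forb.contains (r, a) && decide (r = 0 ∨ r = rows - 1 ∨ a = 0 ∨ a = cols - 1)) = true := by simp [hm, h2]
        have hb2 : (!forb.contains (r, a) && !decide (r = 0 ∨ r = rows - 1 ∨ a = 0 ∨ a = cols - 1)) = false := by simp [hm, h2]
        rw [if_neg h1, if_pos h2, ih, hb, hb2]; simp
      · have hb : (!forb.contains (r, a) && decide (r = 0 ∨ r = rows - 1 ∨ a = 0 ∨ a = cols - 1)) = false := by simp [hm, h2]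
        have hb2 : (!forb.contains (r, a) && !decide (r = 0 ∨ r = rows - 1 ∨ a = 0 ∨ a = cols - 1)) = true := by simp [hm, h2]
        rw [if_neg h1, if_neg h2, ih, hb, hb2]; simp

-- A fold that appends one chunk to each component per step.
theorem pairFold {α : Type} (E I : Int → List α) (rs : List Int) (acc : List α × List α) :
    rs.foldl (fun acc r => (acc.1 ++ E r, acc.2 ++ I r)) acc
    = (acc.1 ++ rs.flatMap E, acc.2 ++ rs.flatMap I) := by
  induction rs generalizing acc with
  | nil => simp
  | cons a t ih => simp [List.foldl_cons, ih]

-- B's middle-rows loop, characterised as a flatMap.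
theorem midFold (forb : List (Int × Int)) (cols : Int) (rs : List Int) (acc : List (Int × Int)) :
    rs.foldl (fun acc r =>
      if cols - 1 ≠ 0 ∧ !forb.contains (r, cols - 1) then
        (if !forb.contains (r, (0 : Int)) then acc ++ [(r, (0 : Int))] else acc) ++ [(r, cols - 1)]
      else (if !forb.contains (r, (0 : Int)) then acc ++ [(r, (0 : Int))] else acc)) acc
    = acc ++ rs.flatMap (fun r =>
        (if !forb.contains (r, (0 : Int)) then [(r, (0 : Int))] else [])
        ++ (if cols - 1 ≠ 0 ∧ !forb.contains (r, cols - 1) then [(r, cols - 1)] else [])) := by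
  induction rs generalizing acc with
  | nil => simp
  | cons a t ih =>
    rw [List.foldl_cons]
    by_cases hw : cols - 1 ≠ 0 ∧ (!forb.contains (a, cols - 1)) = true
    · have hw' : cols - 1 ≠ 0 ∧ (a, cols - 1) ∉ forb := by simpa using hw
      by_cases hp : (!forb.contains (a, (0 : Int))) = true
      · have hp' : (a, (0 : Int)) ∉ forb := by simpa using hp
        rw [if_pos hw, if_pos hp, ih]; simp [hw'.1, hw'.2, hp', List.append_assoc]
      · have hp' : (a, (0 : Int)) ∈ forb := by simpa using hp
        rw [if_pos hw, if_neg hp, ih]; simp [hw'.1, hw'.2, hp', List.append_assoc]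
    · have hw' : ¬ (cols - 1 ≠ 0 ∧ (a, cols - 1) ∉ forb) := by simpa using hw
      by_cases hp : (!forb.contains (a, (0 : Int))) = true
      · have hp' : (a, (0 : Int)) ∉ forb := by simpa using hp
        rw [if_neg hw, if_pos hp, ih]; simp [hw', hp', List.append_assoc]
      · have hp' : (a, (0 : Int)) ∈ forb := by simpa using hp
        rw [if_neg hw, if_neg hp, ih]; simp [hw', hp']

-- a range whose elements all fail the filter condition filters to []
theorem filter_pyRange_nil (a b : Int) (q : Int → Bool) (h : ∀ x, a ≤ x → x < b → q x = false) :
    (PySem.List.pyRange a b 1).filter q = [] := by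
  rw [List.filter_eq_nil_iff]
  intro x hx
  rw [PySem.List.mem_pyRange_one] at hx
  simp [h x hx.1 hx.2]

-- a one-element integer range
theorem pyRange_singleton (a b : Int) (h : b = a + 1) : PySem.List.pyRange a b 1 = [a] := by
  subst h; exact PySem.List.pyRange_one_singleton a

-- the edge cells of one middle row of the column range
theorem colEdgeList (q : Int → Bool) (cols : Int) (h : 1 ≤ cols) :
    (PySem.List.pyRange 0 cols 1).filter (fun c => q c && decide (c = 0 ∨ c = cols - 1))
    = (if q 0 then [(0 : Int)] else []) ++ (if cols - 1 ≠ 0 ∧ q (cols - 1) then [cols - 1] else []) := by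
  rcases eq_or_lt_of_le h with h1 | h2
  · have hc : cols = 1 := h1.symm
    subst hc
    rw [pyRange_singleton 0 1 (by ring)]
    by_cases hq : q 0 = true <;> simp [hq]
  · rw [PySem.List.pyRange_one_append 0 1 cols (by omega) (by omega),
        PySem.List.pyRange_one_append 1 (cols - 1) cols (by omega) (by omega),
        pyRange_singleton 0 1 (by ring), pyRange_singleton (cols - 1) cols (by ring)]
    simp only [List.filter_append]
    rw [filter_pyRange_nil 1 (cols - 1) _ (by
      intro x hx1 hx2
      have hnot : ¬ (x = 0 ∨ x = cols - 1) := by omega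
      simp [hnot])]
    have hne : cols - 1 ≠ 0 := by omega
    by_cases hq0 : q 0 = true <;> by_cases hqL : q (cols - 1) = true <;>
      simp [hq0, hqL, hne]

-- the inner cells of one middle row of the column range
theorem colInnerList (q : Int → Bool) (cols : Int) :
    (PySem.List.pyRange 0 cols 1).filter (fun c => q c && !decide (c = 0 ∨ c = cols - 1))
    = (PySem.List.pyRange 1 (cols - 1) 1).filter q := by
  by_cases h2 : 2 ≤ cols
  · rw [PySem.List.pyRange_one_append 0 1 cols (by omega) (by omega),
        PySem.List.pyRange_one_append 1 (cols - 1) cols (by omega) (by omega),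
        pyRange_singleton 0 1 (by ring), pyRange_singleton (cols - 1) cols (by ring)]
    simp only [List.filter_append]
    have hmid : (PySem.List.pyRange 1 (cols - 1) 1).filter (fun c => q c && !decide (c = 0 ∨ c = cols - 1))
        = (PySem.List.pyRange 1 (cols - 1) 1).filter q := by
      apply List.filter_congr
      intro x hx
      rw [PySem.List.mem_pyRange_one] at hx
      have hnot : ¬ (x = 0 ∨ x = cols - 1) := by omega
      simp [hnot]
    rw [hmid]
    simp
  · by_cases h1 : cols = 1
    · subst h1
      rw [pyRange_singleton 0 1 (by ring), show (1 : Int) - 1 = 0 by ring,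
          show PySem.List.pyRange 1 0 1 = [] from PySem.List.pyRange_one_eq_nil (by omega)]
      simp
    · rw [PySem.List.pyRange_one_eq_nil (by omega), PySem.List.pyRange_one_eq_nil (by omega)]
      simp

-- ===== VERDICT (by name: the statement is the Claim_ definition above) =====
theorem split_edge_and_inner_cells_py_spec : Claim_equal_split_edge_and_inner_cells_py := by
  intro rows cols fp _
  unfold Spec_split_edge_and_inner_cells_py split_edge_and_inner_cells_py split_edge_and_inner_cells_py_alt
  simp only [rowA, pairFold, List.nil_append]
  set forb := fp.getD [] with hforb
  by_cases hr : 1 ≤ rows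
  · by_cases hc : 1 ≤ cols
    · rw [if_pos ⟨hr, hc⟩, midFold]
      simp only [List.nil_append]
      by_cases hr2 : 2 ≤ rows
      · -- rows ≥ 2 : rows range = [0] ++ middle ++ [rows - 1]
        rw [PySem.List.pyRange_one_append 0 1 rows (by omega) (by omega),
            PySem.List.pyRange_one_append 1 (rows - 1) rows (by omega) (by omega),
            pyRange_singleton 0 1 (by ring), pyRange_singleton (rows - 1) rows (by ring)]
        simp only [List.flatMap_append, List.flatMap_singleton]
        rw [if_pos hr2]
        have hmid_e : ((PySem.List.pyRange 1 (rows - 1) 1).flatMap (fun r =>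
            ((PySem.List.pyRange 0 cols 1).filter
              (fun c => !forb.contains (r, c) && decide (r = 0 ∨ r = rows - 1 ∨ c = 0 ∨ c = cols - 1))).map (fun c => (r, c))))
            = (PySem.List.pyRange 1 (rows - 1) 1).flatMap (fun r =>
                (if !forb.contains (r, (0 : Int)) then [(r, (0 : Int))] else [])
                ++ (if cols - 1 ≠ 0 ∧ !forb.contains (r, cols - 1) then [(r, cols - 1)] else [])) := by
          apply List.flatMap_congr
          intro r hrm
          rw [PySem.List.mem_pyRange_one] at hrm
          have h0 : ¬ r = 0 := by omega
          have hL : ¬ r = rows - 1 := by omega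
          have hcl : ((PySem.List.pyRange 0 cols 1).filter
              (fun c => !forb.contains (r, c) && decide (r = 0 ∨ r = rows - 1 ∨ c = 0 ∨ c = cols - 1)))
              = (PySem.List.pyRange 0 cols 1).filter (fun c => !forb.contains (r, c) && decide (c = 0 ∨ c = cols - 1)) := by
            apply List.filter_congr
            intro x _
            simp [h0, hL]
          rw [hcl, colEdgeList (fun c => !forb.contains (r, c)) cols hc]
          simp only [List.map_append]
          split_ifs <;> simp
        have hmid_i : ((PySem.List.pyRange 1 (rows - 1) 1).flatMap (fun r =>
            ((PySem.List.pyRange 0 cols 1).filter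
              (fun c => !forb.contains (r, c) && !decide (r = 0 ∨ r = rows - 1 ∨ c = 0 ∨ c = cols - 1))).map (fun c => (r, c))))
            = (PySem.List.pyRange 1 (rows - 1) 1).flatMap (fun r =>
                ((PySem.List.pyRange 1 (cols - 1) 1).filter (fun c => !forb.contains (r, c))).map (fun c => (r, c))) := by
          apply List.flatMap_congr
          intro r hrm
          rw [PySem.List.mem_pyRange_one] at hrm
          have h0 : ¬ r = 0 := by omega
          have hL : ¬ r = rows - 1 := by omega
          have hcl : ((PySem.List.pyRange 0 cols 1).filter
              (fun c => !forb.contains (r, c) && !decide (r = 0 ∨ r = rows - 1 ∨ c = 0 ∨ c = cols - 1)))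
              = (PySem.List.pyRange 0 cols 1).filter (fun c => !forb.contains (r, c) && !decide (c = 0 ∨ c = cols - 1)) := by
            apply List.filter_congr
            intro x _
            simp [h0, hL]
          rw [hcl, colInnerList (fun c => !forb.contains (r, c)) cols]
        rw [Prod.mk.injEq]
        constructor
        · rw [hmid_e]
          simp [List.append_assoc]
        · rw [hmid_i]
          simp
      · -- rows = 1 : only the top row exists
        have h1 : rows = 1 := by omega
        subst h1
        rw [if_neg (by omega), pyRange_singleton 0 1 (by ring),
            show (1 : Int) - 1 = 0 by ring,
            show PySem.List.pyRange 1 0 1 = [] from PySem.List.pyRange_one_eq_nil (by omega)]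
        simp only [List.flatMap_singleton, List.flatMap_nil, List.append_nil]
        rw [Prod.mk.injEq]
        constructor
        · congr 1
          apply List.filter_congr
          intro x _
          simp
        · simp
    · -- cols ≤ 0 : no cells at all
      rw [if_neg (by omega)]
      have hc0 : (PySem.List.pyRange 0 cols 1) = [] := PySem.List.pyRange_one_eq_nil (by omega)
      have hc1 : (PySem.List.pyRange 1 (cols - 1) 1) = [] := PySem.List.pyRange_one_eq_nil (by omega)
      have hnil : ∀ (l : List Int), l.flatMap (fun _ => ([] : List (Int × Int))) = [] := by
        intro l
        induction l with
        | nil => simp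
        | cons a t ih => simp [ih]
      simp [hc0, hc1, hnil]
  · -- rows ≤ 0 : no cells at all
    rw [if_neg (by omega)]
    have h0 : (PySem.List.pyRange 0 rows 1) = [] := PySem.List.pyRange_one_eq_nil (by omega)
    have h1 : (PySem.List.pyRange 1 (rows - 1) 1) = [] := PySem.List.pyRange_one_eq_nil (by omega)
    simp [h0, h1]
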